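-- pv_equiv track=rewrite | github.com/Bleitch17/Coding-Practice | python3/min-sorting-ops/solution.py | get_min_operations
-- ===== SOURCE A (Python) =====
-- def get_min_operations(nums: list[int]) -> int:
--     zero_elements: set[int] = set()
--     seen_elements: set[int] = set()
--
--     cur, prev = 0, 0
--
--     for i in range(1, len(nums)):
--         cur = 0 if nums[i] in zero_elements else nums[i]
--         prev = 0 if nums[i - 1] in zero_elements else nums[i - 1]
--
--         if cur >= prev:
--             seen_elements.add(nums[i - 1])
--             continue
--
--         # At this point, the current element is smaller than the previous one,
--         # so need to zero out all the elements seen so far.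
--         seen_elements.add(nums[i - 1])
--         zero_elements |= seen_elements
--
--     return len(zero_elements)
-- ===== SOURCE B (Python) =====
-- def get_min_operations(nums: list[int]) -> int:
--     # Stage 1: index of first occurrence of each value, built once.
--     first: dict[int, int] = {}
--     for i, v in enumerate(nums):
--         if v not in first:
--             first[v] = i
--     fo = [first[v] for v in nums]
--     # Stage 2: find the last masked descent; only an integer pointer q is kept.
--     q = 0
--     for i in range(1, len(nums)):
--         cur = 0 if fo[i] < q else nums[i]
--         prev = 0 if fo[i - 1] < q else nums[i - 1]
--         if cur < prev:
--             q = i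
--     # Stage 3: count distinct values in nums[:q] = first occurrences before q.
--     return sum(1 for j in range(q) if fo[j] == j)
-- ===== Notes on version B (the rewrite author's own statement) =====
-- stated objective: faster
-- what changed: B keeps no sets during the scan: a stage-1 pass builds a first-occurrence index per value, the stage-2 loop then compares plain integers (fo[i] < q) and maintains only the pointer q of the last masked descent, and a final pass counts the first occurrences before q; A instead maintains two growing sets and re-unions the whole seen set on every descent.
import Mathlib
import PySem

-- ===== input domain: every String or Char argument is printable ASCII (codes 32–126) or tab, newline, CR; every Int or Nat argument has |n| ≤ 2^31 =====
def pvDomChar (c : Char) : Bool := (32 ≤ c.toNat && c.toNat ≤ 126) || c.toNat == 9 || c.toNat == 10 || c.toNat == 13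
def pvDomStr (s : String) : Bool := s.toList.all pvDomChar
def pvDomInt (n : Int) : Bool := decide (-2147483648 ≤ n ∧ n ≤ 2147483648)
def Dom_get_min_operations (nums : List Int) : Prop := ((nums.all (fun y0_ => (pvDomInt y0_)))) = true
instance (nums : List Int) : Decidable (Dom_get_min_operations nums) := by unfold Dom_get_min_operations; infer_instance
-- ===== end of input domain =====

-- B replaces A's two evolving sets by three stages: a first-occurrence index built once,
-- a pure integer-pointer scan, and a final count of first occurrences (objective: faster).


-- ===== PORT A =====
-- one loop iteration of A (cur/prev recomputed from the zero set, seen grows, union on a drop)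
def stepA (nums : List Int) (st : PySem.Set Int × PySem.Set Int) (i : Int) :
    PySem.Set Int × PySem.Set Int :=
  let cur : Int := if PySem.Set.contains st.1 (PySem.List.pyGetD nums i 0) then 0
                   else PySem.List.pyGetD nums i 0
  let prev : Int := if PySem.Set.contains st.1 (PySem.List.pyGetD nums (i - 1) 0) then 0
                    else PySem.List.pyGetD nums (i - 1) 0
  let seen := PySem.Set.add st.2 (PySem.List.pyGetD nums (i - 1) 0)
  if cur ≥ prev then (st.1, seen)
  else (PySem.Set.union st.1 seen, seen)

def get_min_operations (nums : List Int) : Int :=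
  let st := (PySem.List.pyRange 1 (nums.length : Int) 1).foldl (stepA nums)
              (PySem.Set.empty, PySem.Set.empty)
  PySem.Set.len st.1

-- ===== PORT B =====
-- Stage 1: dict of first-occurrence index per value, built once over enumerate(nums)
def buildFirst (nums : List Int) : PySem.Dict Int Int :=
  (PySem.List.enumerate nums 0).foldl
    (fun d p => if d.contains p.2 then d else d.insert p.2 p.1) PySem.Dict.empty

-- fo = [first[v] for v in nums]  (key always present; getD 0 models the always-hit lookup)
def foList (nums : List Int) : List Int :=
  nums.map (fun v => (buildFirst nums).getD v 0)

-- Stage 2: one loop iteration of B — only the integer pointer q is kept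
def stepB (nums fo : List Int) (q : Int) (i : Int) : Int :=
  let cur : Int := if PySem.List.pyGetD fo i 0 < q then 0 else PySem.List.pyGetD nums i 0
  let prev : Int := if PySem.List.pyGetD fo (i - 1) 0 < q then 0
                    else PySem.List.pyGetD nums (i - 1) 0
  if cur < prev then i else q

def get_min_operations_alt (nums : List Int) : Int :=
  let fo := foList nums
  let q := (PySem.List.pyRange 1 (nums.length : Int) 1).foldl (stepB nums fo) 0
  -- Stage 3: sum(1 for j in range(q) if fo[j] == j)
  ((PySem.List.pyRange 0 q 1).map
    (fun j => if PySem.List.pyGetD fo j 0 = j then (1 : Int) else 0)).sum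

-- ===== PRECONDITION & SPEC =====
def Spec_get_min_operations (nums : List Int) (out : Int) : Prop := out = get_min_operations_alt nums
instance (nums : List Int) (out : Int) : Decidable (Spec_get_min_operations nums out) := by unfold Spec_get_min_operations; infer_instance

-- ===== CLAIM (what is proved, stated in full; the proofs are below) =====
def Claim_equal_get_min_operations : Prop := ∀ (nums : List Int), Dom_get_min_operations nums → Spec_get_min_operations nums (get_min_operations nums)

-- ===== LEMMAS AND PROOFS =====

-- the first-occurrence dict looks up the index of the first occurrence
lemma buildFirst_get? (nums : List Int) (v : Int) :
    (buildFirst nums).get? v = if v ∈ nums then some ((nums.idxOf v : Nat) : Int) else none := by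
  induction nums using List.reverseRecOn generalizing v with
  | nil => simp [buildFirst, PySem.List.enumerate_nil, PySem.Dict.empty, PySem.Dict.get?]
  | append_singleton l x ih =>
      have hstep : buildFirst (l ++ [x])
          = (if (buildFirst l).contains x then buildFirst l
             else (buildFirst l).insert x (l.length : Int)) := by
        unfold buildFirst
        rw [PySem.List.enumerate_append, List.foldl_append]
        simp [PySem.List.enumerate_cons, PySem.List.enumerate_nil]
      have hcont : (buildFirst l).contains x = (x ∈ l : Bool) := by
        rw [PySem.Dict.contains_eq_isSome_get?, ih x]
        by_cases h : x ∈ l <;> simp [h]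
      rw [hstep, hcont]
      by_cases hx : x ∈ l
      · rw [if_pos (by simp [hx]), ih v, List.idxOf_append]
        by_cases hv : v ∈ l
        · simp [hv, List.mem_append]
        · by_cases hvx : v = x
          · subst hvx; exact absurd hx hv
          · simp [hv, hvx]
      · rw [if_neg (by simp [hx])]
        by_cases hvx : v = x
        · subst hvx
          rw [PySem.Dict.get?_insert_self, if_pos (by simp), List.idxOf_append,
            if_neg hx]
          simp [List.idxOf_cons_self]
        · rw [PySem.Dict.get?_insert_of_ne _ _ hvx, ih v, List.idxOf_append]
          by_cases hv : v ∈ l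
          · simp [hv, List.mem_append]
          · simp [hv, hvx]

-- fo reads as idxOf at every in-range index
lemma fo_get (nums : List Int) (j : Nat) (hj : j < nums.length) :
    PySem.List.pyGetD (foList nums) (j : Int) 0 = ((nums.idxOf (nums[j]'hj) : Nat) : Int) := by
  rw [PySem.List.pyGetD_natCast]
  unfold foList
  rw [List.getD_eq_getElem?_getD, List.getElem?_map, List.getElem?_eq_getElem hj]
  simp [PySem.Dict.getD_eq_get?_getD, buildFirst_get?, List.getElem_mem]

-- membership in a prefix is an idxOf bound
lemma mem_take_iff_idxOf_lt (l : List Int) (x : Int) (q : Nat) (hq : q ≤ l.length) :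
    x ∈ l.take q ↔ l.idxOf x < q := by
  constructor
  · intro h
    have := List.idxOf_append (l₁ := l.take q) (l₂ := l.drop q) (a := x)
    rw [List.take_append_drop] at this
    rw [this, if_pos h]
    calc List.idxOf x (l.take q) < (l.take q).length := List.idxOf_lt_length_iff.mpr h
      _ ≤ q := by simp [List.length_take]
  · intro h
    have hlt : l.idxOf x < l.length := lt_of_lt_of_le h hq
    have hget : l[l.idxOf x] = x := List.getElem_idxOf hlt
    have : (l.take q)[l.idxOf x]'(by simp [List.length_take]; omega) = x := by
      rw [List.getElem_take]; exact hget
    rw [← this]; exact List.getElem_mem _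

-- adding a list of elements already present changes nothing
lemma update_self (s : PySem.Set Int) (hs : s.Nodup) : PySem.Set.update s s = s := by
  rw [PySem.Set.update_eq_append_filter, PySem.Set.ofList_eq_self_of_nodup s hs]
  simp

-- re-adding a previously performed update is a no-op
lemma update_update_self (s : PySem.Set Int) (hs : s.Nodup) (l : List Int) :
    PySem.Set.update s (PySem.Set.update s l) = PySem.Set.update s l := by
  rw [PySem.Set.update_eq_append_filter s l, PySem.Set.update_append, update_self s hs]
  set d := ((PySem.Set.ofList l).filter (fun y => !PySem.Set.contains s y)) with hd
  have hnd : d.Nodup := (PySem.Set.nodup_ofList l).filter _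
  have hdis : ∀ x ∈ d, x ∉ s := by
    intro x hx
    have := (List.mem_filter.mp hx).2
    simpa using this
  exact PySem.Set.update_eq_append_of_disjoint s d hnd hdis

-- the union at a drop collapses: zero already is the set of a shorter prefix
lemma union_prefix (nums : List Int) (q m : Nat) (hqm : q ≤ m) :
    PySem.Set.union (PySem.Set.ofList (nums.take q)) (PySem.Set.ofList (nums.take m))
      = PySem.Set.ofList (nums.take m) := by
  have hsplit : nums.take m = nums.take q ++ (nums.take m).drop q := by
    conv_lhs => rw [← List.take_append_drop q (nums.take m)]
    rw [List.take_take, Nat.min_eq_left hqm]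
  have hu : PySem.Set.union (PySem.Set.ofList (nums.take q)) (PySem.Set.ofList (nums.take m))
      = PySem.Set.update (PySem.Set.ofList (nums.take q)) (PySem.Set.ofList (nums.take m)) := rfl
  rw [hu, hsplit, PySem.Set.ofList_append]
  exact update_update_self _ (PySem.Set.nodup_ofList _) _

-- the contains test of A equals the fo-pointer test of B
lemma contains_iff_fo (nums : List Int) (q j : Nat) (hq : q ≤ nums.length)
    (hj : j < nums.length) :
    PySem.Set.contains (PySem.Set.ofList (nums.take q)) (nums[j]'hj) = true
      ↔ PySem.List.pyGetD (foList nums) (j : Int) 0 < (q : Int) := by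
  rw [fo_get nums j hj, PySem.Set.contains_iff, PySem.Set.mem_ofList,
    mem_take_iff_idxOf_lt nums _ q hq]
  exact_mod_cast Iff.rfl

-- the joint invariant: after the indices 1..m-1, A's state is
-- (ofList (take q), ofList (take (m-1))) and B's pointer is q
lemma fold_inv (nums : List Int) (m : Nat) (hm : m ≤ nums.length) :
    ∃ q : Nat, q ≤ m - 1 ∧
      (PySem.List.pyRange 1 (m : Int) 1).foldl (stepA nums) (PySem.Set.empty, PySem.Set.empty)
        = (PySem.Set.ofList (nums.take q), PySem.Set.ofList (nums.take (m - 1))) ∧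
      (PySem.List.pyRange 1 (m : Int) 1).foldl (stepB nums (foList nums)) 0 = (q : Int) := by
  induction m with
  | zero =>
      refine ⟨0, le_refl _, ?_, ?_⟩ <;>
        simp [PySem.List.pyRange_one_eq_nil (by norm_num : (0:Int) ≤ 1), PySem.Set.empty,
          PySem.Set.ofList]
  | succ m ih =>
      rcases Nat.eq_zero_or_pos m with hm0 | hm1
      · subst hm0
        refine ⟨0, by omega, ?_, ?_⟩ <;>
          simp [PySem.List.pyRange_one_eq_nil (by norm_num : (1:Int) ≤ 1), PySem.Set.empty,
            PySem.Set.ofList]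
      · obtain ⟨q, hq, hA, hB⟩ := ih (by omega)
        have hmlt : m < nums.length := by omega
        have hrange : PySem.List.pyRange 1 ((m + 1 : Nat) : Int) 1
            = PySem.List.pyRange 1 (m : Int) 1 ++ [(m : Int)] := by
          push_cast
          exact PySem.List.pyRange_one_succ_right (by exact_mod_cast hm1)
        have hx : PySem.List.pyGetD nums ((m : Nat) : Int) 0 = nums[m]'hmlt := by
          simp [PySem.List.pyGetD_natCast, List.getD_eq_getElem?_getD, hmlt]
        have hcastm : ((m : Nat) : Int) - 1 = ((m - 1 : Nat) : Int) := by omega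
        have hy : PySem.List.pyGetD nums (((m : Nat) : Int) - 1) 0 = nums[m - 1]'(by omega) := by
          rw [hcastm]
          simp [PySem.List.pyGetD_natCast, List.getD_eq_getElem?_getD,
            List.getElem?_eq_getElem (show m - 1 < nums.length by omega)]
        have hfx : (PySem.List.pyGetD (foList nums) ((m : Nat) : Int) 0 < (q : Int))
            ↔ PySem.Set.contains (PySem.Set.ofList (nums.take q)) (nums[m]'hmlt) = true :=
          (contains_iff_fo nums q m (by omega) hmlt).symm
        have hfy : (PySem.List.pyGetD (foList nums) (((m : Nat) : Int) - 1) 0 < (q : Int))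
            ↔ PySem.Set.contains (PySem.Set.ofList (nums.take q)) (nums[m - 1]'(by omega)) = true := by
          rw [hcastm]
          exact (contains_iff_fo nums q (m - 1) (by omega) (by omega)).symm
        have hseen : PySem.Set.add (PySem.Set.ofList (nums.take (m - 1))) (nums[m - 1]'(by omega))
            = PySem.Set.ofList (nums.take m) := by
          rw [← PySem.Set.ofList_append_singleton]
          congr 1
          have h1 : (nums.take (m - 1)).concat (nums[m - 1]'(by omega)) = nums.take (m - 1 + 1) :=
            List.take_concat_get (by omega)
          rw [List.concat_eq_append] at h1
          rw [h1, show m - 1 + 1 = m by omega]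
        have hcurEq : (if PySem.List.pyGetD (foList nums) ((m : Nat) : Int) 0 < (q : Int)
              then (0:Int) else PySem.List.pyGetD nums ((m : Nat) : Int) 0)
            = (if PySem.Set.contains (PySem.Set.ofList (nums.take q)) (nums[m]'hmlt)
              then (0:Int) else nums[m]'hmlt) := by
          rw [hx]; exact if_congr (by simpa using hfx) rfl rfl
        have hprevEq : (if PySem.List.pyGetD (foList nums) (((m : Nat) : Int) - 1) 0 < (q : Int)
              then (0:Int) else PySem.List.pyGetD nums (((m : Nat) : Int) - 1) 0)
            = (if PySem.Set.contains (PySem.Set.ofList (nums.take q)) (nums[m - 1]'(by omega))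
              then (0:Int) else nums[m - 1]'(by omega)) := by
          rw [hy]; exact if_congr (by simpa using hfy) rfl rfl
        by_cases hcond :
            (if PySem.Set.contains (PySem.Set.ofList (nums.take q)) (nums[m]'hmlt) then (0:Int)
             else nums[m]'hmlt)
          < (if PySem.Set.contains (PySem.Set.ofList (nums.take q)) (nums[m - 1]'(by omega)) then (0:Int)
             else nums[m - 1]'(by omega))
        · -- drop: A zeroes the whole prefix up to m, B's pointer moves to m
          refine ⟨m, by omega, ?_, ?_⟩
          · rw [hrange, List.foldl_append, hA]
            simp only [List.foldl_cons, List.foldl_nil, stepA, hx, hy, hseen]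
            rw [if_neg (by simpa using hcond)]
            simp only [Nat.add_sub_cancel]
            exact congrArg (fun z => (z, PySem.Set.ofList (nums.take m)))
              (union_prefix nums q m (by omega))
          · rw [hrange, List.foldl_append, hB]
            simp only [List.foldl_cons, List.foldl_nil, stepB]
            rw [hcurEq, hprevEq, if_pos hcond]
        · refine ⟨q, by omega, ?_, ?_⟩
          · rw [hrange, List.foldl_append, hA]
            simp only [List.foldl_cons, List.foldl_nil, stepA, hx, hy, hseen]
            rw [if_pos (by simpa using hcond)]
            simp
          · rw [hrange, List.foldl_append, hB]
            simp only [List.foldl_cons, List.foldl_nil, stepB]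
            rw [hcurEq, hprevEq, if_neg hcond]

-- the distinct count of a prefix, as a countP of first occurrences
lemma len_ofList_take (nums : List Int) (q : Nat) (hq : q ≤ nums.length) :
    (PySem.Set.ofList (nums.take q)).length
      = (List.range q).countP (fun k => decide (nums.idxOf (nums.getD k 0) = k)) := by
  induction q with
  | zero => simp [PySem.Set.ofList]
  | succ q ih =>
      have hqlt : q < nums.length := by omega
      have htake : nums.take (q + 1) = nums.take q ++ [nums[q]'hqlt] := by
        rw [← List.take_concat_get hqlt, List.concat_eq_append]
      have hgetD : nums.getD q 0 = nums[q]'hqlt := by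
        rw [List.getD_eq_getElem?_getD, List.getElem?_eq_getElem hqlt]; rfl
      have hle : nums.idxOf (nums[q]'hqlt) < q + 1 := by
        rw [← mem_take_iff_idxOf_lt nums _ (q+1) (by omega), htake]
        exact List.mem_append_right _ (List.mem_singleton_self _)
      rw [htake, PySem.Set.ofList_append_singleton, List.range_succ, List.countP_append]
      unfold PySem.Set.add
      by_cases hc : PySem.Set.contains (PySem.Set.ofList (nums.take q)) (nums[q]'hqlt)
      · have hmem : nums[q]'hqlt ∈ nums.take q := by
          have := (PySem.Set.contains_iff _ _).mp hc
          exact (PySem.Set.mem_ofList _ _).mp this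
        have hidx : nums.idxOf (nums[q]'hqlt) < q :=
          (mem_take_iff_idxOf_lt nums _ q (by omega)).mp hmem
        have hne : ¬ (nums.idxOf (nums[q]'hqlt) = q) := by omega
        rw [if_pos hc, ih (by omega)]
        simp only [List.countP_cons, List.countP_nil]
        simpa [List.getElem?_eq_getElem hqlt] using hne
      · have hmem : nums[q]'hqlt ∉ nums.take q := by
          intro h
          exact hc ((PySem.Set.contains_iff _ _).mpr ((PySem.Set.mem_ofList _ _).mpr h))
        have hidx : ¬ nums.idxOf (nums[q]'hqlt) < q :=
          fun h => hmem ((mem_take_iff_idxOf_lt nums _ q (by omega)).mpr h)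
        have heq : nums.idxOf (nums[q]'hqlt) = q := by omega
        rw [if_neg hc, List.length_append, ih (by omega)]
        simp only [List.countP_cons, List.countP_nil]
        simpa [List.getElem?_eq_getElem hqlt] using heq

-- the distinct count of a prefix is the number of global first occurrences inside it
lemma count_firsts (nums : List Int) (q : Nat) (hq : q ≤ nums.length) :
    PySem.Set.len (PySem.Set.ofList (nums.take q))
      = ((PySem.List.pyRange 0 (q : Int) 1).map
          (fun j => if PySem.List.pyGetD (foList nums) j 0 = j then (1 : Int) else 0)).sum := by
  rw [PySem.List.pyRange_zero_natCast, List.map_map]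
  have hmap : (List.range q).map
        ((fun j => if PySem.List.pyGetD (foList nums) j 0 = j then (1 : Int) else 0) ∘ (fun k : Nat => (k : Int)))
      = (List.range q).map
        (fun k => if (fun k => decide (nums.idxOf (nums.getD k 0) = k)) k = true then (1 : Int) else 0) := by
    apply List.map_congr_left
    intro k hk
    have hklt : k < nums.length := lt_of_lt_of_le (List.mem_range.mp hk) hq
    have hgetD : nums.getD k 0 = nums[k]'hklt := by
      rw [List.getD_eq_getElem?_getD, List.getElem?_eq_getElem hklt]; rfl
    simp only [Function.comp, fo_get nums k hklt, hgetD]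
    by_cases h : nums.idxOf (nums[k]'hklt) = k
    · simp [h]
    · rw [if_neg (by exact_mod_cast h), if_neg (by simpa using h)]
  rw [hmap, PySem.List.sum_map_ite_one_zero, ← len_ofList_take nums q hq]
  rfl

-- ===== VERDICT (by name: the statement is the Claim_ definition above) =====
theorem get_min_operations_spec : Claim_equal_get_min_operations := by
  intro nums _
  unfold Spec_get_min_operations get_min_operations get_min_operations_alt
  obtain ⟨q, hq, hA, hB⟩ := fold_inv nums nums.length (le_refl _)
  simp only []
  rw [hA, hB]
  exact count_firsts nums q (by omega)
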